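-- pv_equiv track=rewrite | github.com/kashifusmani/interview_prep | arrays/unique_characters.py | uni_chr
-- ===== SOURCE A (Python) =====
-- def uni_chr(s):
--     res = set()
--     for elem in s:
--         if elem not in res:
--             res.add(elem)
--         else:
--             return False
--     return True
-- ===== SOURCE B (Python) =====
-- def uni_chr(s):
--     return len(set(s)) == len(s)
-- ===== Notes on version B (the rewrite author's own statement) =====
-- stated objective: idiomatic
-- what changed: Replaced the early-exit scan that maintains an incremental seen-set with a single whole-set construction and a cardinality comparison len(set(s)) == len(s).
import Mathlib
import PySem

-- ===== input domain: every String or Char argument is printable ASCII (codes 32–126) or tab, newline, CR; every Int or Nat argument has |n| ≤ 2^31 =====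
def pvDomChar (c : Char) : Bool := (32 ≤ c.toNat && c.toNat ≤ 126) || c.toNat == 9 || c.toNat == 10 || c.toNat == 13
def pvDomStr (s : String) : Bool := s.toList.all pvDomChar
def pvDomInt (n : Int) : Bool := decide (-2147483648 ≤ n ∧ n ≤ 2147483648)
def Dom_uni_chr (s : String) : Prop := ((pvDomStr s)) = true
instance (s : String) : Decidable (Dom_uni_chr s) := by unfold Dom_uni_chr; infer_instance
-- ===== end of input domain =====

-- B replaces A's early-exit scan with set(s) built once and a length comparison (idiomatic).

-- ===== PORT A =====
-- the for-loop of A over the string's characters, carrying the seen-set 'res'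
def uniChrLoop : List Char → PySem.Set Char → Bool
  | [], _ => true
  | c :: rest, res =>
      if PySem.Set.contains res c = false then uniChrLoop rest (PySem.Set.add res c)
      else false

def uni_chr (s : String) : Bool := uniChrLoop s.toList PySem.Set.empty

-- ===== PORT B =====
def uni_chr_alt (s : String) : Bool :=
  decide (PySem.Set.len (PySem.Set.ofList s.toList) = PySem.Str.len s)

-- ===== PRECONDITION & SPEC =====
def Spec_uni_chr (s : String) (out : Bool) : Prop := out = uni_chr_alt s
instance (s : String) (out : Bool) : Decidable (Spec_uni_chr s out) := by unfold Spec_uni_chr; infer_instance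

-- ===== CLAIM (what is proved, stated in full; the proofs are below) =====
def Claim_equal_uni_chr : Prop := ∀ (s : String), Dom_uni_chr s → Spec_uni_chr s (uni_chr s)

-- ===== LEMMAS AND PROOFS =====

lemma uniChrLoop_iff (l : List Char) : ∀ (res : List Char),
    uniChrLoop l res = true ↔ (l.Nodup ∧ ∀ c ∈ l, c ∉ res) := by
  induction l with
  | nil => intro res; simp [uniChrLoop]
  | cons c rest ih =>
      intro res
      by_cases hc : c ∈ res
      · have h1 : PySem.Set.contains res c = true := by simp [hc]
        rw [show uniChrLoop (c :: rest) res =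
              (if PySem.Set.contains res c = false then uniChrLoop rest (PySem.Set.add res c)
               else false) from rfl,
            if_neg (by rw [h1]; decide)]
        simp only [Bool.false_eq_true, false_iff]
        rintro ⟨-, hdisj⟩
        exact hdisj c (by simp) hc
      · have h1 : PySem.Set.contains res c = false := by simp [hc]
        rw [show uniChrLoop (c :: rest) res =
              (if PySem.Set.contains res c = false then uniChrLoop rest (PySem.Set.add res c)
               else false) from rfl,
            if_pos h1, ih]
        simp only [List.nodup_cons, List.mem_cons]
        constructor
        · rintro ⟨hnd, hdisj⟩
          refine ⟨⟨fun hmem => (hdisj c hmem) ((PySem.Set.mem_add res c c).mpr (Or.inr rfl)), hnd⟩, ?_⟩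
          rintro x (rfl | hx)
          · exact hc
          · exact fun hxr => hdisj x hx ((PySem.Set.mem_add res c x).mpr (Or.inl hxr))
        · rintro ⟨⟨hcl, hnd⟩, hdisj⟩
          refine ⟨hnd, fun x hx hxadd => ?_⟩
          rcases (PySem.Set.mem_add res c x).mp hxadd with h | rfl
          · exact hdisj x (Or.inr hx) h
          · exact hcl hx

lemma foldl_add_le (l : List Char) : ∀ (res : List Char),
    (l.foldl PySem.Set.add res).length ≤ res.length + l.length := by
  induction l with
  | nil => intro res; simp
  | cons c rest ih =>
      intro res
      simp only [List.foldl_cons]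
      have h2 : (PySem.Set.add res c).length ≤ res.length + 1 := by
        unfold PySem.Set.add
        split_ifs <;> simp
      have := ih (PySem.Set.add res c)
      simp only [List.length_cons]
      omega

lemma foldl_add_eq_iff (l : List Char) : ∀ (res : List Char),
    ((l.foldl PySem.Set.add res).length = res.length + l.length) ↔
      (l.Nodup ∧ ∀ c ∈ l, c ∉ res) := by
  induction l with
  | nil => intro res; simp
  | cons c rest ih =>
      intro res
      simp only [List.foldl_cons, List.length_cons]
      by_cases hc : c ∈ res
      · have hadd : PySem.Set.add res c = res := by
          unfold PySem.Set.add
          simp [hc]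
        rw [hadd]
        constructor
        · intro h
          have := foldl_add_le rest res
          omega
        · rintro ⟨-, hdisj⟩
          exact absurd hc (hdisj c (by simp))
      · have hadd : PySem.Set.add res c = res ++ [c] := by
          unfold PySem.Set.add
          simp [hc]
        rw [hadd]
        have heq : ((rest.foldl PySem.Set.add (res ++ [c])).length = res.length + (rest.length + 1))
            ↔ ((rest.foldl PySem.Set.add (res ++ [c])).length = (res ++ [c]).length + rest.length) := by
          simp; omega
        rw [heq, ih]
        simp only [List.nodup_cons, List.mem_append, List.mem_cons]
        constructor
        · rintro ⟨hnd, hdisj⟩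
          refine ⟨⟨fun hmem => (hdisj c hmem) (Or.inr (Or.inl rfl)), hnd⟩, ?_⟩
          rintro x (rfl | hx)
          · exact hc
          · exact fun hxr => hdisj x hx (Or.inl hxr)
        · rintro ⟨⟨hcl, hnd⟩, hdisj⟩
          refine ⟨hnd, fun x hx hxapp => ?_⟩
          rcases hxapp with h | (rfl | h0)
          · exact hdisj x (Or.inr hx) h
          · exact hcl hx
          · exact absurd h0 (List.not_mem_nil)

-- ===== VERDICT (by name: the statement is the Claim_ definition above) =====
theorem uni_chr_spec : Claim_equal_uni_chr := by
  intro s _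
  unfold Spec_uni_chr uni_chr uni_chr_alt
  rw [Bool.eq_iff_iff, decide_eq_true_iff]
  have hA := uniChrLoop_iff s.toList PySem.Set.empty
  have hB := foldl_add_eq_iff s.toList []
  simp only [PySem.Set.empty, List.not_mem_nil, not_false_iff, implies_true, and_true,
    List.length_nil, Nat.zero_add] at hA hB
  rw [show uniChrLoop s.toList PySem.Set.empty = uniChrLoop s.toList ([] : List Char) from rfl,
      hA, PySem.Set.ofList_eq_foldl]
  simp only [PySem.Set.len, PySem.Str.len]
  rw [Int.natCast_inj]
  exact hB.symm
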